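-- pv_equiv track=rewrite | github.com/KitCat92314/AoC2024 | Day1/Day1.py | list_similar
-- ===== SOURCE A (Python) =====
-- def list_similar(left, right):
--     sum = 0
--     left.sort()
--     right.sort()
--     for i in left:
--         sames = 0
--         for j in right:
--             if i == j:
--                 sames += 1
--         sum += i * sames
--     return sum
-- ===== SOURCE B (Python) =====
-- def list_similar(left, right):
--     # Sort both lists, then a single linear merge scan over the two sorted lists:
--     # equal runs are grouped and contribute value * (run length left) * (run length right).
--     ls = sorted(left)
--     rs = sorted(right)
--     total = 0
--     i = 0
--     j = 0
--     n = len(ls)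
--     m = len(rs)
--     while i < n and j < m:
--         a = ls[i]
--         b = rs[j]
--         if a < b:
--             i += 1
--         elif b < a:
--             j += 1
--         else:
--             ci = i + 1
--             while ci < n and ls[ci] == a:
--                 ci += 1
--             cj = j + 1
--             while cj < m and rs[cj] == a:
--                 cj += 1
--             total += a * (ci - i) * (cj - j)
--             i = ci
--             j = cj
--     return total
-- ===== Notes on version B (the rewrite author's own statement) =====
-- stated objective: faster
-- what changed: Replaced A's nested counting scan (for each left element, a full pass over right) with a sort-then-linear-merge of the two sorted lists that groups equal runs and adds value * run_left * run_right once per common value; B does not mutate its arguments (A sorts both in place), the return value is unaffected.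
import Mathlib
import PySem

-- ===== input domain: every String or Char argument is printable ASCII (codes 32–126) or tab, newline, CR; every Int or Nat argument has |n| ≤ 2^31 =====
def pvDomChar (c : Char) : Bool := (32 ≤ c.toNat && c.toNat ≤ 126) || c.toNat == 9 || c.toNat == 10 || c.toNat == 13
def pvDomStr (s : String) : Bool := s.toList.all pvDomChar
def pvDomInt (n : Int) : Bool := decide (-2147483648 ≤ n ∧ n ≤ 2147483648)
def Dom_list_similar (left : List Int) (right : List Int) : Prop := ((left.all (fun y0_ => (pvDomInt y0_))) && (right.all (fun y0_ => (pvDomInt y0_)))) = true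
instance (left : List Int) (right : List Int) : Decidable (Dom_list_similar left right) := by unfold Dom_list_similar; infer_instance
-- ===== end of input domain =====

-- B sorts both lists and does one linear merge scan grouping equal runs (O((n+m)log) vs A's O(n*m));
-- A sorts both lists in place (a side effect B omits); the RETURN value, proved equal, ignores that mutation.

-- ===== PORT A =====
def list_similar (left : List Int) (right : List Int) : Int :=
  let leftS := PySem.List.sorted left (fun x => x) false
  let rightS := PySem.List.sorted right (fun x => x) false
  leftS.foldl (fun sum i =>
    sum + i * (rightS.foldl (fun sames j => if i == j then sames + 1 else sames) 0)) 0

-- ===== PORT B =====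
-- length of the prefix of a list consisting of elements equal to a
-- (Source B's inner 'while … == a' advance loops)
def runA (a : Int) : List Int → Nat
  | [] => 0
  | x :: xs => if x == a then runA a xs + 1 else 0

-- Source B's main merge loop over the two sorted lists, as recursion on the two tails
def mergeSim : List Int → List Int → Int
  | [], _ => 0
  | _ :: _, [] => 0
  | a :: ls, b :: rs =>
    if a < b then mergeSim ls (b :: rs)
    else if b < a then mergeSim (a :: ls) rs
    else
      a * (runA a ls + 1 : Nat) * (runA a rs + 1 : Nat)
        + mergeSim (ls.drop (runA a ls)) (rs.drop (runA a rs))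
termination_by ls rs => ls.length + rs.length
decreasing_by
  all_goals simp [List.length_drop] <;> omega

def list_similar_alt (left : List Int) (right : List Int) : Int :=
  mergeSim (PySem.List.sorted left (fun x => x) false) (PySem.List.sorted right (fun x => x) false)

-- ===== PRECONDITION & SPEC =====
def Spec_list_similar (left : List Int) (right : List Int) (out : Int) : Prop := out = list_similar_alt left right
instance (left : List Int) (right : List Int) (out : Int) : Decidable (Spec_list_similar left right out) := by unfold Spec_list_similar; infer_instance

-- ===== CLAIM (what is proved, stated in full; the proofs are below) =====
def Claim_equal_list_similar : Prop := ∀ (left : List Int) (right : List Int), Dom_list_similar left right → Spec_list_similar left right (list_similar left right)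

-- ===== LEMMAS AND PROOFS =====

-- A's inner loop counts occurrences of i in (any) list.
lemma inner_count (i : Int) (l : List Int) :
    l.foldl (fun sames j => if i == j then sames + 1 else sames) 0 = (l.count i : Int) := by
  have h := PySem.List.foldl_if_add_one (fun j => i == j) l (0 : Int)
  rw [h, zero_add, List.count_eq_countP]
  congr 1
  exact List.countP_congr (fun a _ => by rw [Bool.beq_comm])

-- Both sides reduce to Σ_{i ∈ left} i * count(right, i).
lemma A_eq_sum (left right : List Int) :
    list_similar left right = (left.map (fun i => i * (right.count i : Int))).sum := by
  unfold list_similar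
  simp only [inner_count]
  have hr : ∀ i : Int, ((PySem.List.sorted right (fun x => x) false).count i : Int)
      = (right.count i : Int) := by
    intro i
    exact congrArg _ ((PySem.List.sorted_perm right (fun x => x) false).count_eq i)
  simp only [hr]
  rw [PySem.List.foldl_add]
  simp only [zero_add]
  exact ((PySem.List.sorted_perm left (fun x => x) false).map
    (fun i => i * (right.count i : Int))).sum_eq

-- the run prefix is all a's
lemma take_runA (a : Int) (l : List Int) : l.take (runA a l) = List.replicate (runA a l) a := by
  induction l with
  | nil => simp [runA]
  | cons x xs ih =>
    by_cases h : x = a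
    · simp [runA, h, List.replicate_succ, ih]
    · simp [runA, h]

-- after the run, in a sorted list of elements ≥ a, everything is > a
lemma drop_runA_gt (a : Int) (l : List Int) (hs : l.Pairwise (· ≤ ·))
    (hge : ∀ x ∈ l, a ≤ x) : ∀ x ∈ l.drop (runA a l), a < x := by
  induction l with
  | nil => simp
  | cons y ys ih =>
    by_cases h : y = a
    · simp only [runA, h, beq_self_eq_true, if_true, List.drop_succ_cons]
      exact ih hs.of_cons (fun x hx => h ▸ List.rel_of_pairwise_cons hs hx)
    · have hya : a < y := lt_of_le_of_ne (hge y (by simp)) (fun e => h e.symm)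
      simp only [runA, beq_iff_eq, if_neg h, List.drop_zero]
      intro x hx
      rcases List.mem_cons.mp hx with rfl | hx
      · exact hya
      · exact hya.trans_le (List.rel_of_pairwise_cons hs hx)

-- count of a in a sorted list of elements ≥ a is the run length
lemma count_sorted_run (a : Int) (l : List Int) (hs : l.Pairwise (· ≤ ·))
    (hge : ∀ x ∈ l, a ≤ x) : l.count a = runA a l := by
  have hsplit := List.take_append_drop (runA a l) l
  have h1 : (l.take (runA a l)).count a = runA a l := by
    rw [take_runA]; simp
  have h2 : (l.drop (runA a l)).count a = 0 := by
    rw [List.count_eq_zero]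
    intro hmem
    exact absurd rfl (drop_runA_gt a l hs hge a hmem).ne'
  calc l.count a = (l.take (runA a l) ++ l.drop (runA a l)).count a := by rw [hsplit]
    _ = runA a l := by rw [List.count_append, h1, h2]; omega

-- main invariant: on sorted lists the merge scan computes the sum over ls of i * count(rs, i)
lemma mergeSim_eq (n : Nat) : ∀ (ls rs : List Int), ls.length + rs.length ≤ n →
    ls.Pairwise (· ≤ ·) → rs.Pairwise (· ≤ ·) →
    mergeSim ls rs = (ls.map (fun i => i * (rs.count i : Int))).sum := by
  induction n with
  | zero =>
    intro ls rs hlen _ _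
    have : ls = [] := List.eq_nil_of_length_eq_zero (by omega)
    subst this; simp [mergeSim]
  | succ n ih =>
    intro ls rs hlen hls hrs
    match ls, rs with
    | [], _ => simp [mergeSim]
    | x :: ls', [] => simp [mergeSim]
    | a :: ls', b :: rs' =>
      by_cases hab : a < b
      · -- a occurs nowhere in b::rs' (all elements are ≥ b > a)
        have hcnt : (b :: rs').count a = 0 := by
          rw [List.count_eq_zero]
          intro hmem
          rcases List.mem_cons.mp hmem with h | h
          · exact absurd h hab.ne
          · exact absurd (List.rel_of_pairwise_cons hrs h) (not_le.mpr hab)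
        rw [show mergeSim (a :: ls') (b :: rs') = mergeSim ls' (b :: rs') by
          rw [mergeSim]; simp [hab]]
        rw [ih ls' (b :: rs') (by simp at hlen ⊢; omega) hls.of_cons hrs]
        simp [hcnt]
      · by_cases hba : b < a
        · -- b occurs nowhere in a::ls'; dropping it changes no relevant count
          rw [show mergeSim (a :: ls') (b :: rs') = mergeSim (a :: ls') rs' by
            rw [mergeSim]; simp [hab, hba]]
          rw [ih (a :: ls') rs' (by simp at hlen ⊢; omega) hls hrs.of_cons]
          congr 1
          apply List.map_congr_left
          intro i hi
          have hbi : b < i := by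
            rcases List.mem_cons.mp hi with rfl | hi
            · exact hba
            · exact hba.trans_le (List.rel_of_pairwise_cons hls hi)
          have : (b :: rs').count i = rs'.count i := by
            simp [hbi.ne]
          rw [this]
        · have hab' : a = b := le_antisymm (not_lt.mp hba) (not_lt.mp hab)
          subst hab'
          have hgel : ∀ x ∈ ls', a ≤ x := fun x hx => List.rel_of_pairwise_cons hls hx
          have hger : ∀ x ∈ rs', a ≤ x := fun x hx => List.rel_of_pairwise_cons hrs hx
          set kl := runA a ls' with hkl
          set kr := runA a rs' with hkr
          rw [show mergeSim (a :: ls') (a :: rs')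
              = a * (kl + 1 : Nat) * (kr + 1 : Nat) + mergeSim (ls'.drop kl) (rs'.drop kr) by
            rw [mergeSim]; simp [← hkl, ← hkr]]
          have hdl : (ls'.drop kl).Pairwise (· ≤ ·) :=
            hls.of_cons.sublist (List.drop_sublist kl ls')
          have hdr : (rs'.drop kr).Pairwise (· ≤ ·) :=
            hrs.of_cons.sublist (List.drop_sublist kr rs')
          rw [ih (ls'.drop kl) (rs'.drop kr)
            (by simp only [List.length_drop, List.length_cons] at hlen ⊢; omega) hdl hdr]
          -- decompose a :: ls' (resp. a :: rs') as the run of a's followed by the rest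
          have hsplitL : a :: ls' = List.replicate (kl + 1) a ++ ls'.drop kl := by
            rw [List.replicate_succ, List.cons_append]
            congr 1
            conv_lhs => rw [← List.take_append_drop kl ls']
            rw [take_runA]
          have hsplitR : a :: rs' = List.replicate (kr + 1) a ++ rs'.drop kr := by
            rw [List.replicate_succ, List.cons_append]
            congr 1
            conv_lhs => rw [← List.take_append_drop kr rs']
            rw [take_runA]
          -- count of a in a :: rs' is kr + 1
          have hcnt_a : (a :: rs').count a = kr + 1 := by
            rw [List.count_cons_self, count_sorted_run a rs' hrs.of_cons hger]
          -- for elements x > a, count in a :: rs' equals count in rs'.drop kr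
          have hcnt_gt : ∀ x, a < x → (a :: rs').count x = (rs'.drop kr).count x := by
            intro x hx
            conv_lhs => rw [hsplitR]
            rw [List.count_append]
            simp [List.count_replicate, hx.ne]
          conv_rhs => rw [hsplitL]
          rw [List.map_append, List.sum_append, List.map_replicate, List.sum_replicate,
            hcnt_a]
          have hmapeq : (ls'.drop kl).map (fun i => i * (((a :: rs').count i : Nat) : Int))
              = (ls'.drop kl).map (fun i => i * (((rs'.drop kr).count i : Nat) : Int)) := by
            apply List.map_congr_left
            intro i hi
            rw [hcnt_gt i (drop_runA_gt a ls' hls.of_cons hgel i hi)]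
          rw [hmapeq]
          push_cast
          ring_nf

-- B reduces to the same sum (transfer counts and the map-sum across the sort permutations)
lemma B_eq_sum (left right : List Int) :
    list_similar_alt left right = (left.map (fun i => i * (right.count i : Int))).sum := by
  unfold list_similar_alt
  set ls := PySem.List.sorted left (fun x => x) false with hlsd
  set rs := PySem.List.sorted right (fun x => x) false with hrsd
  have hls : ls.Pairwise (· ≤ ·) := PySem.List.sorted_pairwise left (fun x => x)
  have hrs : rs.Pairwise (· ≤ ·) := PySem.List.sorted_pairwise right (fun x => x)
  rw [mergeSim_eq (ls.length + rs.length) ls rs le_rfl hls hrs]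
  have hcnt : ∀ i : Int, (rs.count i : Int) = (right.count i : Int) := fun i =>
    congrArg _ ((PySem.List.sorted_perm right (fun x => x) false).count_eq i)
  simp only [hcnt]
  exact ((PySem.List.sorted_perm left (fun x => x) false).map
    (fun i => i * (right.count i : Int))).sum_eq

-- ===== VERDICT (by name: the statement is the Claim_ definition above) =====
theorem list_similar_spec : Claim_equal_list_similar := by
  intro left right _
  unfold Spec_list_similar
  rw [A_eq_sum, B_eq_sum]
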